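-- pv_equiv track=rewrite | github.com/Press-Play-On-Tape/The-Curse-Of-AstaroK | Curse/src/utils/messages-convert.py | GetMessageText
-- ===== SOURCE A (Python) =====
-- def GetMessageText(s):
--   b = s.find('"')
--   e = s.rfind('"')
--
--   text = s[b + 1:e].strip().replace('\\n', ' ')
--   for ch in ['\\','`','*','_','{','}','[',']','(',')','>','#','+','-','.','$','\'',':',',','"','?']:
--     if ch in text:
--         text = text.replace(ch,' ')
--
--   return text
-- ===== SOURCE B (Python) =====
-- _PUNCT = frozenset('\\`*_{}[]()>#+-.$\':,"?')
--
-- def GetMessageText(s):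
--   b = s.find('"')
--   e = s.rfind('"')
--   text = s[b + 1:e].strip().replace('\\n', ' ')
--   return ''.join(' ' if c in _PUNCT else c for c in text)
-- ===== Notes on version B (the rewrite author's own statement) =====
-- stated objective: idiomatic
-- what changed: The 21-iteration replace loop (each replace rescanning the whole string) is replaced by a single pass over the text that maps every punctuation character (set membership) to a space.
import Mathlib
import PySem

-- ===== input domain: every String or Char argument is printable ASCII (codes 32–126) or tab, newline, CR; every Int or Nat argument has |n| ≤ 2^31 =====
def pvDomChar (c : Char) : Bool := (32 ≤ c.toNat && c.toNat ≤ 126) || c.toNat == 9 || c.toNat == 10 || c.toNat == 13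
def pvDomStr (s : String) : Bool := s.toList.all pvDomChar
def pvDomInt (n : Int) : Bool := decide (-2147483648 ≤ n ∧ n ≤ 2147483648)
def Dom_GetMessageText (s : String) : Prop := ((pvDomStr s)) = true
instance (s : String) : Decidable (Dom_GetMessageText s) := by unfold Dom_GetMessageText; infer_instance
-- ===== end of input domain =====

-- B replaces A's 21 successive whole-string replace() passes by one pass over the
-- text mapping every punctuation character (set membership) to a space (idiomatic).

-- ===== PORT A =====
-- the list of one-character strings A's for-loop iterates over
def pvPunctA : List String :=
  ["\\","`","*","_","{","}","[","]","(",")",">","#","+","-",".","$","'",":",",","\"","?"]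

def GetMessageText (s : String) : String :=
  let b := PySem.Str.find s "\""
  let e := PySem.Str.rfind s "\""
  let text := PySem.Str.replace (PySem.Str.strip (PySem.Str.slice s (some (b + 1)) (some e))) "\\n" " "
  pvPunctA.foldl (fun t ch => if PySem.Str.isIn ch t then PySem.Str.replace t ch " " else t) text

-- ===== PORT B =====
-- the frozenset of punctuation characters (all distinct, so the set is this list)
def pvPunctB : PySem.Set Char :=
  PySem.Set.ofList ['\\','`','*','_','{','}','[',']','(',')','>','#','+','-','.','$','\'',':',',','"','?']

def GetMessageText_alt (s : String) : String :=
  let b := PySem.Str.find s "\""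
  let e := PySem.Str.rfind s "\""
  let text := PySem.Str.replace (PySem.Str.strip (PySem.Str.slice s (some (b + 1)) (some e))) "\\n" " "
  String.ofList (text.toList.map (fun c => if PySem.Set.contains pvPunctB c then ' ' else c))

-- ===== PRECONDITION & SPEC =====
def Spec_GetMessageText (s : String) (out : String) : Prop := out = GetMessageText_alt s
instance (s : String) (out : String) : Decidable (Spec_GetMessageText s out) := by unfold Spec_GetMessageText; infer_instance

-- ===== CLAIM (what is proved, stated in full; the proofs are below) =====
def Claim_equal_GetMessageText : Prop := ∀ (s : String), Dom_GetMessageText s → Spec_GetMessageText s (GetMessageText s)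

-- ===== LEMMAS AND PROOFS =====

-- replace of a single-character pattern is a character-wise map (replace.go, by fuel)
theorem pv_replace_go_single (c d : Char) :
    ∀ (fuel : Nat) (l acc : List Char), l.length ≤ fuel →
      PySem.Chars.replace.go [c] [d] fuel l acc
        = acc.reverse ++ l.map (fun x => if x = c then d else x) := by
  intro fuel
  induction fuel with
  | zero => intro l acc h; simp at h; subst h; simp [PySem.Chars.replace.go]
  | succ n ih =>
    intro l acc h
    cases l with
    | nil => simp [PySem.Chars.replace.go]
    | cons x t =>
      simp only [PySem.Chars.replace.go]
      by_cases hx : x = c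
      · subst hx
        simp only [List.isPrefixOf, beq_self_eq_true, Bool.true_and, if_pos, List.length_cons,
          List.length_nil, List.drop_succ_cons, List.drop_zero]
        rw [ih t _ (by simpa using Nat.le_of_succ_le_succ h)]
        simp
      · have : List.isPrefixOf [c] (x :: t) = false := by
          simp [List.isPrefixOf]; exact fun hh => absurd hh.symm hx
        rw [this]
        simp only [Bool.false_eq_true, if_false]
        rw [ih t _ (by simpa using Nat.le_of_succ_le_succ h)]
        simp [hx]

theorem pv_replace_single (c d : Char) (l : List Char) :
    PySem.Chars.replace l [c] [d] = l.map (fun x => if x = c then d else x) := by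
  simp [PySem.Chars.replace]
  rw [pv_replace_go_single c d l.length l [] le_rfl]
  simp

-- one iteration of A's loop, on the character list
theorem pv_step_char (p : Char) (l : List Char) :
    (if PySem.Chars.isIn [p] l then PySem.Chars.replace l [p] [' '] else l)
      = l.map (fun x => if x = p then ' ' else x) := by
  by_cases h : PySem.Chars.isIn [p] l = true
  · rw [if_pos h, pv_replace_single]
  · rw [if_neg (by simpa using h)]
    have hp : p ∉ l := fun hm =>
      (PySem.Chars.isIn_eq_false_iff [p] l).mp (by simpa using h)
        ((List.singleton_infix_iff p l).mpr hm)
    rw [List.map_congr_left (fun x hx => if_neg (fun he : x = p => hp (he ▸ hx)))]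
    simp

-- A's whole loop, on the character list: replacing each char of P in turn is one map
theorem pv_loop_char (P : List Char) (h : ' ' ∉ P) (l : List Char) :
    P.foldl (fun t p => if PySem.Chars.isIn [p] t then PySem.Chars.replace t [p] [' '] else t) l
      = l.map (fun x => if x ∈ P then ' ' else x) := by
  induction P generalizing l with
  | nil => simp
  | cons p P ih =>
    simp only [List.foldl_cons]
    rw [pv_step_char, ih (fun hm => h (List.mem_cons_of_mem _ hm)), List.map_map]
    refine List.map_congr_left (fun x _ => ?_)
    by_cases hx : x = p
    · subst hx
      simp [List.mem_cons]
    · simp [Function.comp, hx, List.mem_cons]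

-- bridge A's String-level fold to the character-level fold
theorem pv_str_fold (P : List Char) (t : String) :
    (P.map (fun c => String.ofList [c])).foldl
        (fun t ch => if PySem.Str.isIn ch t then PySem.Str.replace t ch " " else t) t
      = String.ofList
          (P.foldl (fun l p => if PySem.Chars.isIn [p] l then PySem.Chars.replace l [p] [' '] else l) t.toList) := by
  induction P generalizing t with
  | nil => simp
  | cons p P ih =>
    simp only [List.map_cons, List.foldl_cons]
    rw [ih]
    congr 1
    by_cases h : PySem.Chars.isIn [p] t.toList = true
    · rw [if_pos (by simpa [PySem.Str.isIn] using h), if_pos h]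
      simp [PySem.Str.toList_replace]
    · rw [if_neg (by simpa [PySem.Str.isIn] using h), if_neg (by simpa using h)]

-- the two tails agree on any text
theorem pv_tail_eq (text : String) :
    pvPunctA.foldl (fun t ch => if PySem.Str.isIn ch t then PySem.Str.replace t ch " " else t) text
      = String.ofList (text.toList.map (fun c => if PySem.Set.contains pvPunctB c then ' ' else c)) := by
  have hA : pvPunctA
      = (['\\','`','*','_','{','}','[',']','(',')','>','#','+','-','.','$','\'',':',',','"','?'] : List Char).map
          (fun c => String.ofList [c]) := by decide
  rw [hA, pv_str_fold, pv_loop_char _ (by decide)]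
  congr 1
  refine List.map_congr_left (fun x _ => ?_)
  have hc : PySem.Set.contains pvPunctB x
      = decide (x ∈ (['\\','`','*','_','{','}','[',']','(',')','>','#','+','-','.','$','\'',':',',','"','?'] : List Char)) := by
    simp [pvPunctB, PySem.Set.contains, PySem.Set.ofList]
  rw [hc]
  by_cases hx : x ∈ (['\\','`','*','_','{','}','[',']','(',')','>','#','+','-','.','$','\'',':',',','"','?'] : List Char)
  · rw [if_pos hx, if_pos (by simpa using hx)]
  · rw [if_neg hx, if_neg (by simpa using hx)]

-- ===== VERDICT (by name: the statement is the Claim_ definition above) =====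
set_option maxRecDepth 4096 in
theorem GetMessageText_spec : Claim_equal_GetMessageText := by
  intro s _
  unfold Spec_GetMessageText GetMessageText GetMessageText_alt
  exact pv_tail_eq _
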